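/-
  THE CONTRACTS OF THE READERS (design/CONTRACTS.md entries 1-4, 8, 13-15; design/INVARIANTS.md §5): the driver's `mem_read`
  (gif_driver.c:42), `InternalRead` (dgif_lib.c:33, the INDIRECT call through `Private->Read`), and the functions of dgif_lib.c that
  only read input: `DGifGetWord`, `DGifGetRecordType`, `DGifBufferedInput`, `DGifGetExtensionNext`, `DGifGetExtension`,
  `DGifGetCodeNext`. Vocabulary: Gif/Spec/Common.lean. THIS FILE IS THE TEMPLATE of every contract file of the program.

  GHOST PARAMETERS of every Spec: the heap `H`, the other live objects `rest` (globals, input, output), the active protected frames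
  `frames` (the function's own protected frame is NOT among them: it pushes it itself), the forest `F`, the reader `R`; the two
  copying functions add the byte count `n` (a ghost, so that the footprint is a list of LITERAL windows over the entry state).

  THE COMMON PRECONDITION: `Env H rest frames F R u` (= `HeapPre` ∧ `Ctx` ∧ `GifOK`), and `rdi = F.gif`.
  THE COMMON POSTCONDITION of a function that allocates nothing: `Back H rest frames F R u v` (the heap's invariant for the SAME
  heap with the clean stack ending at the caller's stack pointer, `GifOK` for the SAME forest, `rem` not increased), plus what the
  function says of `rem` and of its result. NO content clause: what the bytes read ARE is never needed (INVARIANTS: "no CONTENT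
  clause"). A 32-bit result is stated as `(v.reg .rax).toNat % 2 ^ 32` unless the code zero-extends it (then `(v.reg .rax).toNat`).

  A BUFFER ARGUMENT `[b, b + n)` of a copying function: `LiveIn` (one live object: what the sanitizer's check and `memcpy` ask),
  `Loose H F R ⟨b, b + n⟩` (the store keeps the shape: a stack buffer below the cursor, `pv.Buf`), `HeapWin H ⟨b, b + n⟩` (it keeps
  the heap's data side), and `0x700000 ≤ b` (it is a stack or heap address: so it does not meet the input, `Ctx.input_range`).

  FRAMES (c/gif/gif_STACK.txt does NOT follow the indirect call; /design/FRAMES.gif.txt does: own frame + 8 + the deepest callee's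
  CONTRACT frame):
      function               own                       callees (frame)                                   frame
      mem_read               4 pushes + sub 8 = 40     memcpy (80), the checks (16)              40 + 8 + 80 = 128
      InternalRead           4 pushes + sub 8 = 40     mem_read (128) THROUGH `call rax`, checks 40 + 8 + 128 = 176
      DGifGetWord            3 pushes + sub 64 = 88    InternalRead (176), checks                88 + 8 + 176 = 272
      DGifGetRecordType      4 pushes + sub 72 = 104   InternalRead (176), checks               104 + 8 + 176 = 288
      DGifBufferedInput      5 pushes = 40             InternalRead (176), checks                40 + 8 + 176 = 224
      DGifGetExtensionNext   6 pushes + sub 88 = 136   InternalRead (176), checks               136 + 8 + 176 = 320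
      DGifGetExtension       5 pushes + sub 64 = 104   InternalRead (176), DGifGetExtensionNext (320)   104 + 8 + 320 = 432
      DGifGetCodeNext        6 pushes + sub 88 = 136   InternalRead (176), checks               136 + 8 + 176 = 320
-/
import Gif.Spec.CommonMore
namespace Gif.Spec
open X86 X86.User Asan ProgX.Base ProgX.Base.Spec

/-- **What a copying reader leaves behind**, for a request of `n` bytes: it delivered `k = min(n, rem)` bytes — `k ≤ n`, and a SHORT
read (`k < n`) means the input is exhausted —, the result register holds `k` (zero-extended), the reader advanced by `k`, and the
environment holds again. -/
def ReadPost (H : Heap) (rest : List Obj) (frames : List (Nat × FrameLayout)) (F : Forest) (R : Rd) (n : Nat) (u v : State) :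
    Prop :=
  ∃ k, k ≤ n ∧ k ≤ rem R u.mem ∧ (k < n → k = rem R u.mem) ∧
    (v.reg .rax).toNat = k ∧
    rem R v.mem = rem R u.mem - k ∧
    Back H rest frames F R u v

/-- **What a copying reader asks of its buffer** `[b, b + n)`: inside one live object; loose for the shape; a heap window; a stack
or heap address. -/
structure BufOK (H : Heap) (rest : List Obj) (frames : List (Nat × FrameLayout)) (F : Forest) (R : Rd) (b n : Nat) : Prop where
  live : LiveIn (H.liveObjs ++ rest) frames b n
  loose : Loose H F R ⟨b, b + n⟩
  win : HeapWin H ⟨b, b + n⟩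
  high : 0x700000 ≤ b

/-- **An OUT-POINTER to a stack object of a caller** (`*Type`, `*NextByte`, `*Extension`, `*ExtCode`, `*CodeBlock`, `*Code`): `BufOK`, and the
range ends below 800000H: with `BufOK.high` it is a STACK address, so it cannot lie inside gif or pv (`BufOK.loose` alone admits the
scalar fields of gif and the body of pv: an out-pointer into pv's LZW scalars or `Buf` would break the very clauses the posts state). -/
structure OutPtr (H : Heap) (rest : List Obj) (frames : List (Nat × FrameLayout)) (F : Forest) (R : Rd) (b n : Nat) : Prop where
  buf : BufOK H rest frames F R b n
  low : b + n ≤ 0x800000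

/-- **`mem_read(rdi = gif, rsi = buf, edx = len)`** (gif_driver.c:42, type `InputFunc`): `c = gif->UserData`; copies
`min(len, c->end − c->cur)` bytes from `c->cur` to `buf` (libc's instrumented `memcpy`: every byte is checked), advances `c->cur`,
returns the count. Ghost `n` = `len`, at least 1 (every call site of InternalRead asks for 1 … 255 bytes; the arm `len <= 0` is
dead). Footprint: the buffer, `c->cur`, 128 bytes of stack. -/
def mem_read.spec (H : Heap) (rest : List Obj) (frames : List (Nat × FrameLayout)) (F : Forest) (R : Rd) (n : Nat) : Spec where
  pre u :=
    Env H rest frames F R u ∧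
    (u.reg .rdi).toNat = F.gif ∧
    (u.reg .rdx).toNat % 2 ^ 32 = n ∧ 1 ≤ n ∧ n < 2 ^ 31 ∧
    BufOK H rest frames F R (u.reg .rsi).toNat n
  post u v :=
    ReadPost H rest frames F R n u v
  frame := 128
  writes u :=
    [⟨(u.reg .rsi).toNat, (u.reg .rsi).toNat + n⟩,
     ⟨R.cur, R.cur + 8⟩]

@[vspec] theorem mem_read.spec_frame (H : Heap) (rest : List Obj) (frames : List (Nat × FrameLayout)) (F : Forest) (R : Rd)
    (n : Nat) : (mem_read.spec H rest frames F R n).frame = 128 := id rfl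

@[vspec] theorem mem_read.spec_writes (H : Heap) (rest : List Obj) (frames : List (Nat × FrameLayout)) (F : Forest) (R : Rd)
    (n : Nat) (u : State) :
    (mem_read.spec H rest frames F R n).writes u =
      [⟨(u.reg .rsi).toNat, (u.reg .rsi).toNat + n⟩,
       ⟨R.cur, R.cur + 8⟩] := id rfl

/-- **`InternalRead(rdi = gif, rsi = buf, edx = len)`** (dgif_lib.c:33-39): `Private->Read ? Private->Read(gif, buf, len) :
fread(…)`. `GifOK.shape.read` says `Private->Read = &mem_read ≠ 0`: the `fread` arm (a stub, `ud2`) is dead, and the indirect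
`call rax` lands on `mem_read`, whose contract is a hypothesis of the unit (`u_call … at`). Same contract as `mem_read`, 48 more
bytes of stack. -/
def InternalRead.spec (H : Heap) (rest : List Obj) (frames : List (Nat × FrameLayout)) (F : Forest) (R : Rd) (n : Nat) : Spec where
  pre u :=
    Env H rest frames F R u ∧
    (u.reg .rdi).toNat = F.gif ∧
    (u.reg .rdx).toNat % 2 ^ 32 = n ∧ 1 ≤ n ∧ n < 2 ^ 31 ∧
    BufOK H rest frames F R (u.reg .rsi).toNat n
  post u v :=
    ReadPost H rest frames F R n u v
  frame := 176
  writes u :=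
    [⟨(u.reg .rsi).toNat, (u.reg .rsi).toNat + n⟩,
     ⟨R.cur, R.cur + 8⟩]

@[vspec] theorem InternalRead.spec_frame (H : Heap) (rest : List Obj) (frames : List (Nat × FrameLayout)) (F : Forest) (R : Rd)
    (n : Nat) : (InternalRead.spec H rest frames F R n).frame = 176 := id rfl

@[vspec] theorem InternalRead.spec_writes (H : Heap) (rest : List Obj) (frames : List (Nat × FrameLayout)) (F : Forest) (R : Rd)
    (n : Nat) (u : State) :
    (InternalRead.spec H rest frames F R n).writes u =
      [⟨(u.reg .rsi).toNat, (u.reg .rsi).toNat + n⟩,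
       ⟨R.cur, R.cur + 8⟩] := id rfl

/-- **`DGifGetWord(rdi = gif, rsi = Word)`** (dgif_lib.c:740-751, static; a PROTECTED frame: the two-byte buffer `c`): reads two
bytes; GIF_OK (1): `*Word` is their little-endian value, at most 65535, and the reader advanced by exactly 2; GIF_ERROR (0):
`gif.Error` was stored, `*Word` is untouched. `Word` points to a 4-byte scalar field of gif — the six call sites pass
`&gif->SWidth`, `&gif->SHeight`, `&gif->Image.{Left,Top,Width,Height}`: offsets 0, 4, 40, 44, 48, 52 —, stated as "4 bytes inside
`[gif, gif + 24)` or `[gif + 40, gif + 64)`". Footprint: those 4 bytes, `gif.Error`, `c->cur`, 272 bytes of stack. -/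
def DGifGetWord.spec (H : Heap) (rest : List Obj) (frames : List (Nat × FrameLayout)) (F : Forest) (R : Rd) : Spec where
  pre u :=
    Env H rest frames F R u ∧
    (u.reg .rdi).toNat = F.gif ∧
    ((F.gif ≤ (u.reg .rsi).toNat ∧ (u.reg .rsi).toNat + 4 ≤ F.gif + 24) ∨
     (F.gif + 40 ≤ (u.reg .rsi).toNat ∧ (u.reg .rsi).toNat + 4 ≤ F.gif + 64))
  post u v :=
    Back H rest frames F R u v ∧
    ((v.reg .rax).toNat = 1 ∨ (v.reg .rax).toNat = 0) ∧
    ((v.reg .rax).toNat = 1 →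
      rd v.mem (u.reg .rsi).toNat 4 ≤ 65535 ∧ rem R v.mem + 2 = rem R u.mem) ∧
    ((v.reg .rax).toNat = 0 →
      rd v.mem (u.reg .rsi).toNat 4 = rd u.mem (u.reg .rsi).toNat 4)
  frame := 272
  writes u :=
    [⟨(u.reg .rsi).toNat, (u.reg .rsi).toNat + 4⟩,
     ⟨F.gif + 96, F.gif + 100⟩,
     ⟨R.cur, R.cur + 8⟩]

@[vspec] theorem DGifGetWord.spec_frame (H : Heap) (rest : List Obj) (frames : List (Nat × FrameLayout)) (F : Forest) (R : Rd) :
    (DGifGetWord.spec H rest frames F R).frame = 272 := id rfl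

@[vspec] theorem DGifGetWord.spec_writes (H : Heap) (rest : List Obj) (frames : List (Nat × FrameLayout)) (F : Forest) (R : Rd)
    (u : State) :
    (DGifGetWord.spec H rest frames F R).writes u =
      [⟨(u.reg .rsi).toNat, (u.reg .rsi).toNat + 4⟩,
       ⟨F.gif + 96, F.gif + 100⟩,
       ⟨R.cur, R.cur + 8⟩] := id rfl

/-- The result of a function that answers GIF_OK (1) or GIF_ERROR (0) in `eax` (zero-extended: `mov eax, imm32`). -/
def IsBool (v : State) : Prop := (v.reg .rax).toNat = 1 ∨ (v.reg .rax).toNat = 0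

/-- **`DGifGetRecordType(rdi = gif, rsi = Type)`** (dgif_lib.c:325-359; a PROTECTED frame: the byte `Buf`): reads one byte.
GIF_OK: `*Type` is IMAGE_DESC (2), EXTENSION (3) or TERMINATE (4), the reader advanced by exactly 1 (THE measure of DGifSlurp's
record loop). GIF_ERROR: `gif.Error` stored; `*Type` UNDEFINED (0) or untouched. `Type` points to a 4-byte stack object of the
caller. Footprint: `*Type`, `gif.Error`, `c->cur`, 288 bytes of stack. -/
def DGifGetRecordType.spec (H : Heap) (rest : List Obj) (frames : List (Nat × FrameLayout)) (F : Forest) (R : Rd) : Spec where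
  pre u :=
    Env H rest frames F R u ∧
    (u.reg .rdi).toNat = F.gif ∧
    OutPtr H rest frames F R (u.reg .rsi).toNat 4
  post u v :=
    Back H rest frames F R u v ∧
    IsBool v ∧
    ((v.reg .rax).toNat = 1 →
      (rd v.mem (u.reg .rsi).toNat 4 = 2 ∨ rd v.mem (u.reg .rsi).toNat 4 = 3 ∨ rd v.mem (u.reg .rsi).toNat 4 = 4) ∧
      rem R v.mem + 1 = rem R u.mem)
  frame := 288
  writes u :=
    [⟨(u.reg .rsi).toNat, (u.reg .rsi).toNat + 4⟩,
     ⟨F.gif + 96, F.gif + 100⟩,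
     ⟨R.cur, R.cur + 8⟩]

@[vspec] theorem DGifGetRecordType.spec_frame (H : Heap) (rest : List Obj) (frames : List (Nat × FrameLayout)) (F : Forest)
    (R : Rd) : (DGifGetRecordType.spec H rest frames F R).frame = 288 := id rfl

@[vspec] theorem DGifGetRecordType.spec_writes (H : Heap) (rest : List Obj) (frames : List (Nat × FrameLayout)) (F : Forest)
    (R : Rd) (u : State) :
    (DGifGetRecordType.spec H rest frames F R).writes u =
      [⟨(u.reg .rsi).toNat, (u.reg .rsi).toNat + 4⟩,
       ⟨F.gif + 96, F.gif + 100⟩,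
       ⟨R.cur, R.cur + 8⟩] := id rfl

/-- **`DGifBufferedInput(rdi = gif, rsi = Buf, rdx = NextByte)`** (dgif_lib.c:1118-1148, static): `Buf` is `pv.Buf` (256 bytes at
`pv + 88`); `Buf[0]` = bytes left in the current sub-block, `Buf[1]` = index of the next one. Every access to `Buf` is in bounds
BY TYPE (the indices are bytes: INVARIANTS §3.1). GIF_OK: `*NextByte` stored, and `rem + Buf[0]` went down by at least 1 (a byte
moved from the input, or from the buffer, to the caller). `NextByte` points to a 1-byte stack object of the caller. Footprint:
`pv.Buf`, `*NextByte`, `gif.Error`, `c->cur`, 224 bytes of stack: NO LZW field. -/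
def DGifBufferedInput.spec (H : Heap) (rest : List Obj) (frames : List (Nat × FrameLayout)) (F : Forest) (R : Rd) : Spec where
  pre u :=
    Env H rest frames F R u ∧
    (u.reg .rdi).toNat = F.gif ∧
    (u.reg .rsi).toNat = F.pv + 88 ∧
    OutPtr H rest frames F R (u.reg .rdx).toNat 1
  post u v :=
    Back H rest frames F R u v ∧
    IsBool v ∧
    ((v.reg .rax).toNat = 1 →
      rem R v.mem + rd v.mem (F.pv + 88) 1 + 1 ≤ rem R u.mem + rd u.mem (F.pv + 88) 1)
  frame := 224
  writes u :=
    [⟨F.pv + 88, F.pv + 344⟩,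
     ⟨(u.reg .rdx).toNat, (u.reg .rdx).toNat + 1⟩,
     ⟨F.gif + 96, F.gif + 100⟩,
     ⟨R.cur, R.cur + 8⟩]

@[vspec] theorem DGifBufferedInput.spec_frame (H : Heap) (rest : List Obj) (frames : List (Nat × FrameLayout)) (F : Forest)
    (R : Rd) : (DGifBufferedInput.spec H rest frames F R).frame = 224 := id rfl

@[vspec] theorem DGifBufferedInput.spec_writes (H : Heap) (rest : List Obj) (frames : List (Nat × FrameLayout)) (F : Forest)
    (R : Rd) (u : State) :
    (DGifBufferedInput.spec H rest frames F R).writes u =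
      [⟨F.pv + 88, F.pv + 344⟩,
       ⟨(u.reg .rdx).toNat, (u.reg .rdx).toNat + 1⟩,
       ⟨F.gif + 96, F.gif + 100⟩,
       ⟨R.cur, R.cur + 8⟩] := id rfl

/-- **What a sub-block reader leaves in its out-pointer `p`** (8 bytes) on GIF_OK: NULL — the terminator: one byte consumed —, or
`&pv.Buf` with `Buf[0] = n`, `1 ≤ n ≤ 255`, the `n` bytes read behind it: `1 + n` bytes consumed. -/
def BlockPost (F : Forest) (R : Rd) (p : Nat) (u v : State) : Prop :=
  (rd v.mem p 8 = 0 ∧ rem R v.mem + 1 = rem R u.mem) ∨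
  (rd v.mem p 8 = F.pv + 88 ∧ 1 ≤ rd v.mem (F.pv + 88) 1 ∧ rd v.mem (F.pv + 88) 1 ≤ 255 ∧
    rem R v.mem + 1 + rd v.mem (F.pv + 88) 1 = rem R u.mem)

/-- **`DGifGetExtensionNext(rdi = gif, rsi = Extension)`** (dgif_lib.c:598-624; a PROTECTED frame: the byte `Buf`): reads a
sub-block length; 0: `*Extension = NULL`; `n > 0`: `*Extension = pv.Buf`, `Buf[0] = n`, reads `n` bytes to `Buf[1 …]`.
`Extension` points to an 8-byte stack object of the caller. Footprint: `pv.Buf`, `*Extension`, `gif.Error`, `c->cur`. -/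
def DGifGetExtensionNext.spec (H : Heap) (rest : List Obj) (frames : List (Nat × FrameLayout)) (F : Forest) (R : Rd) : Spec where
  pre u :=
    Env H rest frames F R u ∧
    (u.reg .rdi).toNat = F.gif ∧
    OutPtr H rest frames F R (u.reg .rsi).toNat 8
  post u v :=
    Back H rest frames F R u v ∧
    IsBool v ∧
    ((v.reg .rax).toNat = 1 → BlockPost F R (u.reg .rsi).toNat u v)
  frame := 320
  writes u :=
    [⟨F.pv + 88, F.pv + 344⟩,
     ⟨(u.reg .rsi).toNat, (u.reg .rsi).toNat + 8⟩,
     ⟨F.gif + 96, F.gif + 100⟩,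
     ⟨R.cur, R.cur + 8⟩]

@[vspec] theorem DGifGetExtensionNext.spec_frame (H : Heap) (rest : List Obj) (frames : List (Nat × FrameLayout)) (F : Forest)
    (R : Rd) : (DGifGetExtensionNext.spec H rest frames F R).frame = 320 := id rfl

@[vspec] theorem DGifGetExtensionNext.spec_writes (H : Heap) (rest : List Obj) (frames : List (Nat × FrameLayout)) (F : Forest)
    (R : Rd) (u : State) :
    (DGifGetExtensionNext.spec H rest frames F R).writes u =
      [⟨F.pv + 88, F.pv + 344⟩,
       ⟨(u.reg .rsi).toNat, (u.reg .rsi).toNat + 8⟩,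
       ⟨F.gif + 96, F.gif + 100⟩,
       ⟨R.cur, R.cur + 8⟩] := id rfl

/-- **`DGifGetExtension(rdi = gif, rsi = ExtCode, rdx = Extension)`** (dgif_lib.c:569-591; a PROTECTED frame: the byte `Buf`): reads
the function code (`*ExtCode`, at most 255), then `DGifGetExtensionNext(gif, Extension)`. GIF_OK: one byte more consumed than
`BlockPost` says. `ExtCode` and `Extension` point to a 4-byte and an 8-byte stack object of the caller (different objects). -/
def DGifGetExtension.spec (H : Heap) (rest : List Obj) (frames : List (Nat × FrameLayout)) (F : Forest) (R : Rd) : Spec where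
  pre u :=
    Env H rest frames F R u ∧
    (u.reg .rdi).toNat = F.gif ∧
    OutPtr H rest frames F R (u.reg .rsi).toNat 4 ∧
    OutPtr H rest frames F R (u.reg .rdx).toNat 8 ∧
    ((u.reg .rsi).toNat + 4 ≤ (u.reg .rdx).toNat ∨ (u.reg .rdx).toNat + 8 ≤ (u.reg .rsi).toNat)
  post u v :=
    Back H rest frames F R u v ∧
    IsBool v ∧
    ((v.reg .rax).toNat = 1 →
      rd v.mem (u.reg .rsi).toNat 4 ≤ 255 ∧
      ((rd v.mem (u.reg .rdx).toNat 8 = 0 ∧ rem R v.mem + 2 = rem R u.mem) ∨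
       (rd v.mem (u.reg .rdx).toNat 8 = F.pv + 88 ∧ 1 ≤ rd v.mem (F.pv + 88) 1 ∧ rd v.mem (F.pv + 88) 1 ≤ 255 ∧
         rem R v.mem + 2 + rd v.mem (F.pv + 88) 1 = rem R u.mem)))
  frame := 432
  writes u :=
    [⟨F.pv + 88, F.pv + 344⟩,
     ⟨(u.reg .rsi).toNat, (u.reg .rsi).toNat + 4⟩,
     ⟨(u.reg .rdx).toNat, (u.reg .rdx).toNat + 8⟩,
     ⟨F.gif + 96, F.gif + 100⟩,
     ⟨R.cur, R.cur + 8⟩]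

@[vspec] theorem DGifGetExtension.spec_frame (H : Heap) (rest : List Obj) (frames : List (Nat × FrameLayout)) (F : Forest)
    (R : Rd) : (DGifGetExtension.spec H rest frames F R).frame = 432 := id rfl

@[vspec] theorem DGifGetExtension.spec_writes (H : Heap) (rest : List Obj) (frames : List (Nat × FrameLayout)) (F : Forest)
    (R : Rd) (u : State) :
    (DGifGetExtension.spec H rest frames F R).writes u =
      [⟨F.pv + 88, F.pv + 344⟩,
       ⟨(u.reg .rsi).toNat, (u.reg .rsi).toNat + 4⟩,
       ⟨(u.reg .rdx).toNat, (u.reg .rdx).toNat + 8⟩,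
       ⟨F.gif + 96, F.gif + 100⟩,
       ⟨R.cur, R.cur + 8⟩] := id rfl

/-- **`DGifGetCodeNext(rdi = gif, rsi = CodeBlock)`** (dgif_lib.c:779-808; a PROTECTED frame: the byte `Buf`): as
DGifGetExtensionNext, and on the terminator it also stores `pv.Buf[0] = 0`, `pv.PixelCount = 0`. On GIF_OK the reader advanced by
at least 1 (the measure of DGifGetLine's flush loop). Footprint: `pv.PixelCount`, `pv.Buf`, `*CodeBlock`, `gif.Error`, `c->cur`:
NO LZW field. -/
def DGifGetCodeNext.spec (H : Heap) (rest : List Obj) (frames : List (Nat × FrameLayout)) (F : Forest) (R : Rd) : Spec where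
  pre u :=
    Env H rest frames F R u ∧
    (u.reg .rdi).toNat = F.gif ∧
    OutPtr H rest frames F R (u.reg .rsi).toNat 8
  post u v :=
    Back H rest frames F R u v ∧
    IsBool v ∧
    ((v.reg .rax).toNat = 1 →
      (rd v.mem (u.reg .rsi).toNat 8 = 0 ∨ rd v.mem (u.reg .rsi).toNat 8 = F.pv + 88) ∧
      rem R v.mem + 1 ≤ rem R u.mem)
  frame := 320
  writes u :=
    [⟨F.pv + 56, F.pv + 64⟩,
     ⟨F.pv + 88, F.pv + 344⟩,
     ⟨(u.reg .rsi).toNat, (u.reg .rsi).toNat + 8⟩,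
     ⟨F.gif + 96, F.gif + 100⟩,
     ⟨R.cur, R.cur + 8⟩]

@[vspec] theorem DGifGetCodeNext.spec_frame (H : Heap) (rest : List Obj) (frames : List (Nat × FrameLayout)) (F : Forest)
    (R : Rd) : (DGifGetCodeNext.spec H rest frames F R).frame = 320 := id rfl

@[vspec] theorem DGifGetCodeNext.spec_writes (H : Heap) (rest : List Obj) (frames : List (Nat × FrameLayout)) (F : Forest)
    (R : Rd) (u : State) :
    (DGifGetCodeNext.spec H rest frames F R).writes u =
      [⟨F.pv + 56, F.pv + 64⟩,
       ⟨F.pv + 88, F.pv + 344⟩,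
       ⟨(u.reg .rsi).toNat, (u.reg .rsi).toNat + 8⟩,
       ⟨F.gif + 96, F.gif + 100⟩,
       ⟨R.cur, R.cur + 8⟩] := id rfl

end Gif.Spec
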